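-- pv_equiv track=rewrite | github.com/chanwoo-lee-cw/TIL | Algorithm_problem_solving/Baek-joon/1316/1316.py | isGroupSentence
-- ===== SOURCE A (Python) =====
-- def isGroupSentence(line):
--     pre = '-'
--     alphaSet = set()
--     for alphabet in line:
--         if alphabet == pre or alphabet not in alphaSet:
--             pre = alphabet
--             alphaSet.add(alphabet)
--         else:
--             return False
--     return True
-- ===== SOURCE B (Python) =====
-- from itertools import groupby
--
--
-- def isGroupSentence(line):
--     keys = [k for k, _ in groupby(line)]
--     return len(keys) == len(set(keys))
-- ===== Notes on version B (the rewrite author's own statement) =====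
-- stated objective: idiomatic
-- what changed: B replaces A's single interleaved pass (sentinel 'pre' plus incrementally grown set with early return) by a two-phase compress-then-check: run-length-compress the string to its list of group keys via itertools.groupby, then test that list for duplicates with len(keys) == len(set(keys)).
import Mathlib
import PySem

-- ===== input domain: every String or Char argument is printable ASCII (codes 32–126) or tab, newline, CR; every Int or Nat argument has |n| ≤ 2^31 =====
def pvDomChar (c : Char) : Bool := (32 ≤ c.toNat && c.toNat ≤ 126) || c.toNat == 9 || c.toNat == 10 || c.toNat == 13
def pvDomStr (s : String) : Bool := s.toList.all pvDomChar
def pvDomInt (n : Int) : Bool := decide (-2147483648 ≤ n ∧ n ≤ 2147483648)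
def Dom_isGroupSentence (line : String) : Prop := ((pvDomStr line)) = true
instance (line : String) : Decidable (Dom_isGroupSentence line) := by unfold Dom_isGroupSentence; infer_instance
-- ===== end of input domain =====

-- B re-implements A as compress-then-check (groupby keys, then uniqueness test) instead of
-- A's single interleaved pass with a sentinel and an incrementally grown set; same cost.

-- ===== PORT A =====
-- the for-loop of A with its early 'return False', state = (pre, alphaSet)
def pvGoA : List Char → Char → PySem.Set Char → Bool
  | [], _, _ => true
  | c :: rest, pre, s =>
      if c = pre || !(PySem.Set.contains s c) then pvGoA rest c (PySem.Set.add s c)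
      else false

def isGroupSentence (line : String) : Bool :=
  pvGoA line.toList '-' PySem.Set.empty

-- ===== PORT B =====
-- [k for k, _ in groupby(line)]: one key per maximal run of equal adjacent characters
def pvKeys : List Char → List Char
  | [] => []
  | [c] => [c]
  | c :: d :: rest => if c = d then pvKeys (d :: rest) else c :: pvKeys (d :: rest)

def isGroupSentence_alt (line : String) : Bool :=
  let keys := pvKeys line.toList
  keys.length == (PySem.Set.ofList keys).length

-- ===== PRECONDITION & SPEC =====
def Spec_isGroupSentence (line : String) (out : Bool) : Prop := out = isGroupSentence_alt line
instance (line : String) (out : Bool) : Decidable (Spec_isGroupSentence line out) := by unfold Spec_isGroupSentence; infer_instance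

-- ===== CLAIM (what is proved, stated in full; the proofs are below) =====
def Claim_equal_isGroupSentence : Prop := ∀ (line : String), Dom_isGroupSentence line → Spec_isGroupSentence line (isGroupSentence line)

-- ===== LEMMAS AND PROOFS =====

-- keys of the rest of the string, given that the current run has key `pre`
def pvGrpFrom : Char → List Char → List Char
  | _, [] => []
  | pre, c :: rest => if c = pre then pvGrpFrom pre rest else c :: pvGrpFrom c rest

theorem pvKeys_cons (c : Char) (rest : List Char) :
    pvKeys (c :: rest) = c :: pvGrpFrom c rest := by
  induction rest generalizing c with
  | nil => rfl
  | cons d rest ih =>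
      by_cases h : c = d
      · subst h
        simp [pvKeys, pvGrpFrom, ih]
      · simp [pvKeys, pvGrpFrom, h, ih, Ne.symm h]

-- len(set) = len ↔ no duplicates
theorem pvLenOfList (xs : List Char) :
    (PySem.Set.ofList xs).length = xs.length ↔ xs.Nodup := by
  induction xs using List.reverseRecOn with
  | nil => simp
  | append_singleton xs x ih =>
      rw [PySem.Set.ofList_append_singleton, PySem.Set.add_eq_ite]
      have hle := PySem.Set.length_ofList_le xs
      by_cases h : x ∈ xs
      · rw [if_pos ((PySem.Set.mem_ofList xs x).mpr h)]
        simp only [List.length_append, List.length_singleton, List.nodup_append]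
        constructor
        · intro hlen; omega
        · rintro ⟨-, -, hd⟩; exact (hd x h x (by simp) rfl).elim
      · rw [if_neg (fun hm => h ((PySem.Set.mem_ofList xs x).mp hm))]
        simp only [List.length_append, List.length_singleton, List.nodup_append,
          List.nodup_singleton]
        constructor
        · intro hlen
          refine ⟨ih.mp (by omega), trivial, ?_⟩
          intro a ha b hb
          have hbx : b = x := by simpa using hb
          exact fun hab => h (hbx ▸ hab ▸ ha)
        · rintro ⟨hnd, -, -⟩
          have := ih.mpr hnd
          omega

-- loop invariant for A's pass: with pre already recorded in the (duplicate-free) set s,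
-- the loop succeeds iff the remaining group keys are pairwise distinct and avoid s
theorem pvGoA_iff (l : List Char) (pre : Char) (s : PySem.Set Char)
    (hnd : s.Nodup) (hpre : pre ∈ s) :
    pvGoA l pre s = true ↔ (pvGrpFrom pre l).Nodup ∧ ∀ k ∈ pvGrpFrom pre l, k ∉ s := by
  induction l generalizing pre s with
  | nil => simp [pvGoA, pvGrpFrom]
  | cons c rest ih =>
      by_cases hc : c = pre
      · subst hc
        have : PySem.Set.add s c = s := PySem.Set.add_of_mem hpre
        simp only [pvGoA, pvGrpFrom, decide_true, Bool.true_or, if_true, this]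
        exact ih c s hnd hpre
      · by_cases hm : c ∈ s
        · have hct : PySem.Set.contains s c = true := (PySem.Set.contains_iff s c).mpr hm
          have hfalse : pvGoA (c :: rest) pre s = false := by
            simp [pvGoA, hc]
            intro h
            exact absurd hm h
          rw [hfalse]
          simp only [pvGrpFrom, if_neg hc, Bool.false_eq_true, false_iff, not_and]
          intro _ h
          exact h c (List.mem_cons_self ..) hm
        · have hco : PySem.Set.contains s c = false := by
            cases h : PySem.Set.contains s c
            · rfl
            · exact absurd ((PySem.Set.contains_iff s c).mp h) hm
          have hadd : PySem.Set.add s c = s ++ [c] := PySem.Set.add_of_not_mem hm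
          simp only [pvGoA, pvGrpFrom, if_neg hc, hco, Bool.not_false, Bool.or_true, if_true, hadd]
          have hnd' : (s ++ [c]).Nodup := by
            rw [← hadd]; exact PySem.Set.nodup_add s c hnd
          have ihc := ih c (s ++ [c]) hnd' (by simp)
          rw [ihc]
          constructor
          · rintro ⟨h1, h2⟩
            have hcT : c ∉ pvGrpFrom c rest := fun hk => h2 c hk (by simp)
            refine ⟨List.nodup_cons.mpr ⟨hcT, h1⟩, ?_⟩
            intro k hk
            rcases List.mem_cons.mp hk with rfl | hk'
            · exact hm
            · exact fun hks => h2 k hk' (List.mem_append.mpr (Or.inl hks))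
          · rintro ⟨hnd2, h2⟩
            obtain ⟨hcT, h1⟩ := List.nodup_cons.mp hnd2
            refine ⟨h1, ?_⟩
            intro k hk hks
            rcases List.mem_append.mp hks with hks' | hks'
            · exact h2 k (List.mem_cons.mpr (Or.inr hk)) hks'
            · have hkc : k = c := by simpa using hks'
              exact hcT (hkc ▸ hk)

theorem pvPorts_agree (line : String) : isGroupSentence line = isGroupSentence_alt line := by
  have key : ∀ (ks : List Char),
      isGroupSentence_alt line = (ks.length == (PySem.Set.ofList ks).length) →
      pvKeys line.toList = ks → isGroupSentence line = isGroupSentence_alt line := by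
    intro ks h1 h2
    rw [h1]
    cases hcs : line.toList with
    | nil =>
        subst h2
        simp [isGroupSentence, hcs, pvGoA, pvKeys]
    | cons c rest =>
        have hB : (ks.length == (PySem.Set.ofList ks).length) = decide ks.Nodup := by
          rcases Bool.decide_iff ks.Nodup |>.symm with _
          by_cases hnd : ks.Nodup
          · simp [hnd, (pvLenOfList ks).mpr hnd]
          · have : (PySem.Set.ofList ks).length ≠ ks.length :=
              fun h => hnd ((pvLenOfList ks).mp h)
            simp [hnd]
            omega
        rw [hB]
        subst h2
        rw [hcs, pvKeys_cons]
        have hstep : isGroupSentence line = pvGoA rest c (PySem.Set.add PySem.Set.empty c) := by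
          unfold isGroupSentence
          rw [hcs]
          simp [pvGoA, PySem.Set.empty]
        have hadd : PySem.Set.add (PySem.Set.empty (α := Char)) c = [c] := by
          simp [PySem.Set.add_of_not_mem, PySem.Set.empty]
        rw [hstep, hadd]
        have hinv := pvGoA_iff rest c [c] (by simp) (by simp)
        cases hA : pvGoA rest c [c]
        · have : ¬ ((pvGrpFrom c rest).Nodup ∧ ∀ k ∈ pvGrpFrom c rest, k ∉ ([c] : List Char)) := by
            intro hx
            have := hinv.mpr hx
            rw [hA] at this
            exact Bool.false_ne_true this
          simp only [List.nodup_cons]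
          by_cases hT : (pvGrpFrom c rest).Nodup
          · by_cases hcT : c ∈ pvGrpFrom c rest
            · simp [hcT]
            · exact absurd ⟨hT, fun k hk hks => by
                simp at hks; subst hks; exact hcT hk⟩ this
          · simp [hT]
        · obtain ⟨hT, hdis⟩ := hinv.mp hA
          have hcT : c ∉ pvGrpFrom c rest := fun hk => hdis c hk (by simp)
          simp [List.nodup_cons, hcT, hT]
  exact key (pvKeys line.toList) rfl rfl

-- ===== VERDICT (by name: the statement is the Claim_ definition above) =====
theorem isGroupSentence_spec : Claim_equal_isGroupSentence := by
  intro line _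
  unfold Spec_isGroupSentence
  exact pvPorts_agree line
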